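-- pv_equiv track=rewrite | github.com/mason0315/HMM | crf_nlp4j.py | get_word_spans
-- ===== SOURCE A (Python) =====
-- from typing import List, Tuple, Dict
--
-- def get_word_spans(tags: List[str]) -> set:
--     spans, start = set(), 0
--     for i, tag in enumerate(tags):
--         if tag in ("B", "S"):
--             start = i
--         if tag in ("E", "S"):
--             spans.add((start, i))
--     return spans
-- ===== SOURCE B (Python) =====
-- from typing import List, Tuple, Dict
--
-- def get_word_spans(tags: List[str]) -> set:
--     spans = set()
--     for i, t in enumerate(tags):
--         if t in ("E", "S"):
--             start = 0
--             for j in range(i, -1, -1):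
--                 if tags[j] in ("B", "S"):
--                     start = j
--                     break
--             spans.add((start, i))
--     return spans
-- ===== Notes on version B (the rewrite author's own statement) =====
-- stated objective: alternative
-- what changed: Drops A's running start variable entirely: B only loops over end tags (E/S) and, for each one, searches backward from that position for the nearest B/S tag (defaulting to 0), a per-end brute-force search instead of A's stateful single pass.
import Mathlib
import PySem

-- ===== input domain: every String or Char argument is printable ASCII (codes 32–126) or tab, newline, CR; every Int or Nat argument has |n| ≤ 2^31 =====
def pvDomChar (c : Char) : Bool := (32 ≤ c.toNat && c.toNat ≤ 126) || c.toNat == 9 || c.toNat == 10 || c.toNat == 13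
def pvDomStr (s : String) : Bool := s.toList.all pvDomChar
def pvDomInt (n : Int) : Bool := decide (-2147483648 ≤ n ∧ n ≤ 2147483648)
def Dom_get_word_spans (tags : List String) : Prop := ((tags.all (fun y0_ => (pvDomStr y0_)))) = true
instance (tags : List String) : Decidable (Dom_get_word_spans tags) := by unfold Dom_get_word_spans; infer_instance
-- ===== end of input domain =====

-- B drops A's running start variable: it loops over end tags only and, for each, searches
-- backward for the nearest B/S tag (default 0) — a per-end search instead of A's stateful pass.


-- ===== PORT A =====
-- A: one pass over enumerate(tags) carrying (spans, start); B/S updates start, E/S adds (start, i).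
def get_word_spans (tags : List String) : List (Int × Int) :=
  ((PySem.List.enumerate tags 0).foldl
    (fun (st : PySem.Set (Int × Int) × Int) p =>
      let start := if p.2 = "B" ∨ p.2 = "S" then p.1 else st.2
      (if p.2 = "E" ∨ p.2 = "S" then PySem.Set.add st.1 (start, p.1) else st.1, start))
    (PySem.Set.empty, 0)).1

-- ===== PORT B =====
-- Source B's inner loop: for j in range(i, -1, -1): if tags[j] in ("B","S"): start = j; break
-- (the for-with-break is List.find?; indices j scanned satisfy 0 ≤ j ≤ i < len, so pyGet? is exact)
def pvStartOf (tags : List String) (i : Int) : Int :=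
  match (PySem.List.pyRange i (-1) (-1)).find?
      (fun j => (PySem.List.pyGet? tags j).getD "" == "B"
             || (PySem.List.pyGet? tags j).getD "" == "S") with
  | some j => j
  | none => 0

-- Source B's outer loop: add (backward-found start, i) for each E/S position
def get_word_spans_alt (tags : List String) : List (Int × Int) :=
  (PySem.List.enumerate tags 0).foldl
    (fun (s : PySem.Set (Int × Int)) p =>
      if p.2 = "E" ∨ p.2 = "S" then PySem.Set.add s (pvStartOf tags p.1, p.1) else s)
    PySem.Set.empty

-- ===== PRECONDITION & SPEC =====
def Spec_get_word_spans (tags : List String) (out : List (Int × Int)) : Prop := out = get_word_spans_alt tags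
instance (tags : List String) (out : List (Int × Int)) : Decidable (Spec_get_word_spans tags out) := by unfold Spec_get_word_spans; infer_instance

-- ===== CLAIM (what is proved, stated in full; the proofs are below) =====
def Claim_equal_get_word_spans : Prop := ∀ (tags : List String), Dom_get_word_spans tags → Spec_get_word_spans tags (get_word_spans tags)

-- ===== LEMMAS AND PROOFS =====

-- find? only looks at members of the list
theorem pv_find?_congr {α : Type} {p q : α → Bool} : ∀ {l : List α}, (∀ a ∈ l, p a = q a) → l.find? p = l.find? q := by
  intro l
  induction l with
  | nil => intro _; rfl
  | cons x xs ih =>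
      intro h
      simp only [List.find?_cons]
      rw [h x (by simp)]
      cases q x with
      | true => rfl
      | false => exact ih (fun a ha => h a (by simp [ha]))

-- the scan predicate on tags ++ [t] agrees with the one on tags at any index below tags.length
theorem pv_pred_agree (tags : List String) (t : String) (j : Int) (h0 : 0 ≤ j) (hjl : j < (tags.length : Int)) :
    ((PySem.List.pyGet? (tags ++ [t]) j).getD "" == "B" || (PySem.List.pyGet? (tags ++ [t]) j).getD "" == "S")
      = ((PySem.List.pyGet? tags j).getD "" == "B" || (PySem.List.pyGet? tags j).getD "" == "S") := by
  rw [PySem.List.pyGet?_of_nonneg _ h0, PySem.List.pyGet?_of_nonneg _ h0,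
      List.getElem?_append_left (by omega : j.toNat < tags.length)]

-- the backward scan never sees the appended element when it starts strictly below tags.length
theorem pv_startOf_append (tags : List String) (t : String) (i : Int) (hi : i < (tags.length : Int)) :
    pvStartOf (tags ++ [t]) i = pvStartOf tags i := by
  unfold pvStartOf
  rw [pv_find?_congr (fun j hj => ?_)]
  rw [PySem.List.mem_pyRange_neg_one] at hj
  exact pv_pred_agree tags t j (by omega) (by omega)

-- the backward scan at the appended position: hit it iff it is B/S, else continue in the prefix
theorem pv_startOf_last (tags : List String) (t : String) :
    pvStartOf (tags ++ [t]) (tags.length : Int)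
      = if t = "B" ∨ t = "S" then (tags.length : Int)
        else pvStartOf tags ((tags.length : Int) - 1) := by
  unfold pvStartOf
  rw [PySem.List.pyRange_neg_one_cons (by omega : (-1:Int) < (tags.length : Int))]
  rw [List.find?_cons]
  have hlast : PySem.List.pyGet? (tags ++ [t]) (tags.length : Int) = some t := by
    simpa using PySem.List.pyGet?_append_length (pre := tags) (y := t) (ys := [])
  rw [hlast]
  by_cases hbs : t = "B" ∨ t = "S"
  · have : (t == "B" || t == "S") = true := by
      rcases hbs with h | h <;> simp [h]
    simp [this, hbs]
  · have hb : (t == "B" || t == "S") = false := by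
      rcases (not_or.1 hbs) with ⟨h1, h2⟩; simp [h1, h2]
    simp only [Option.getD_some, hb, if_neg hbs]
    rw [pv_find?_congr (fun j hj => ?_)]
    rw [PySem.List.mem_pyRange_neg_one] at hj
    exact pv_pred_agree tags t j (by omega) (by omega)

-- the prefix part of B's fold on tags ++ [t] is exactly B's fold on tags
theorem pv_b_prefix (tags : List String) (t : String) :
    (PySem.List.enumerate tags 0).foldl
      (fun (s : PySem.Set (Int × Int)) p =>
        if p.2 = "E" ∨ p.2 = "S" then PySem.Set.add s (pvStartOf (tags ++ [t]) p.1, p.1) else s)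
      PySem.Set.empty = get_word_spans_alt tags := by
  unfold get_word_spans_alt
  apply PySem.List.foldl_congr_mem
  intro acc p hp
  rcases (PySem.List.mem_enumerate_iff _ _ _).1 hp with ⟨k, hk, rfl⟩
  simp only
  rw [pv_startOf_append tags t _ (by omega)]

-- B's fold on tags ++ [t]: the prefix gives B on tags, then one step at index tags.length
theorem pv_b_append (tags : List String) (t : String) :
    get_word_spans_alt (tags ++ [t])
      = if t = "E" ∨ t = "S"
        then PySem.Set.add (get_word_spans_alt tags)
              (pvStartOf (tags ++ [t]) (tags.length : Int), (tags.length : Int))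
        else get_word_spans_alt tags := by
  conv_lhs => rw [get_word_spans_alt]
  rw [PySem.List.enumerate_append, List.foldl_append, pv_b_prefix]
  simp [PySem.List.enumerate_cons, PySem.List.enumerate_nil]

-- main invariant, by induction from the right: A's fold carries exactly
-- (B's set, the backward-scan start at the last position)
theorem pv_main : ∀ tags : List String,
    ((PySem.List.enumerate tags 0).foldl
      (fun (st : PySem.Set (Int × Int) × Int) p =>
        let start := if p.2 = "B" ∨ p.2 = "S" then p.1 else st.2
        (if p.2 = "E" ∨ p.2 = "S" then PySem.Set.add st.1 (start, p.1) else st.1, start))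
      (PySem.Set.empty, 0))
    = (get_word_spans_alt tags, pvStartOf tags ((tags.length : Int) - 1)) := by
  intro tags
  induction tags using List.reverseRecOn with
  | nil => simp [PySem.List.enumerate_nil, get_word_spans_alt, pvStartOf,
      PySem.List.pyRange_neg_one_eq_nil (by omega : (-1:Int) ≤ -1)]
  | append_singleton tags t ih =>
      rw [PySem.List.enumerate_append, List.foldl_append, ih]
      simp only [PySem.List.enumerate_cons, PySem.List.enumerate_nil, List.foldl_cons,
        List.foldl_nil, zero_add]
      rw [pv_b_append]
      have hlen : ((tags ++ [t]).length : Int) - 1 = (tags.length : Int) := by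
        simp only [List.length_append, List.length_cons, List.length_nil]; push_cast; omega
      rw [hlen, pv_startOf_last]

-- ===== VERDICT (by name: the statement is the Claim_ definition above) =====
theorem get_word_spans_spec : Claim_equal_get_word_spans := by
  intro tags _
  show get_word_spans tags = get_word_spans_alt tags
  unfold get_word_spans
  rw [pv_main]
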